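-- pv_equiv track=rewrite | github.com/ivgnk/Pyton-Codewars-Leetcode | Leetcode/subarray_2134_medi_Minimum Swaps to Group All 1's Together II.py | minSwaps3
-- ===== SOURCE A (Python) =====
-- def minSwaps3(nums):
--     """
--     :type nums: List[int]
--     :rtype: int
--     """
--     ll = len(nums)
--     n1 = nums.count(1)
--     if n1 == 0: return 0
--     s = nums[0:n1]
--     n11=n1 - 1
--     nums = nums + s
--     nn_1 = s.count(1)
--     for i in range(1, ll):
--         s.pop(0)
--         s = s + [nums[i + n11]]
--         nn_1 = max(nn_1, s.count(1))
--     return n1 - nn_1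
-- ===== SOURCE B (Python) =====
-- def minSwaps3(nums):
--     n = len(nums)
--     k = nums.count(1)
--     if k == 0:
--         return 0
--     ext = nums + nums[:k]
--     cnt = ext[:k].count(1)
--     best = cnt
--     for i in range(1, n):
--         cnt += (1 if ext[i + k - 1] == 1 else 0) - (1 if ext[i - 1] == 1 else 0)
--         if cnt > best:
--             best = cnt
--     return k - best
-- ===== Notes on version B (the rewrite author's own statement) =====
-- stated objective: alternative
-- what changed: Replaces the loop that rebuilds the window list (pop/append) and recounts its 1s each step with a sliding window that updates a single running count incrementally and keeps a running maximum.
import Mathlib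
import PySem

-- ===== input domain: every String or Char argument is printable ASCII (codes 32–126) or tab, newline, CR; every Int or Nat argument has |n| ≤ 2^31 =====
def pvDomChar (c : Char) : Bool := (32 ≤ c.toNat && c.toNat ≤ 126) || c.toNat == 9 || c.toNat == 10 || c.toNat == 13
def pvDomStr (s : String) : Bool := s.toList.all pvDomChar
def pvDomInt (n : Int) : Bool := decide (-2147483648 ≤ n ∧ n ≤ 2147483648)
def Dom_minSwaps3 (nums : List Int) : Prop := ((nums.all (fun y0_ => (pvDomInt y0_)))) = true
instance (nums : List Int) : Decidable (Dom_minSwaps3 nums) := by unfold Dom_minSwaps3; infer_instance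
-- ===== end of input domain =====

-- B replaces A's per-step window rebuild + full recount with an incremental sliding-window count (objective: alternative).

-- ===== PORT A =====
-- A's loop body: s.pop(0); s = s + [nums[i + n11]]; nn_1 = max(nn_1, s.count(1))
def pvBodyA (nums2 : List Int) (n11 : Int) (st : List Int × Int) (i : Int) : List Int × Int :=
  -- the window is always nonempty and the index in range here; getD / pyGetD-default are only totality guards
  let s1 := ((PySem.List.pop? st.1 0).map Prod.snd).getD st.1
  let s2 := s1 ++ [PySem.List.pyGetD nums2 (i + n11) 0]
  (s2, max st.2 (PySem.List.count s2 1 : Int))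

-- literal transliteration of A: keeps the window as a list, pops/appends and recounts each iteration
def minSwaps3 (nums : List Int) : Int :=
  let ll : Int := nums.length
  let n1 : Nat := PySem.List.count nums 1
  if n1 = 0 then 0
  else
    let s := PySem.List.slice nums (some 0) (some (n1 : Int))
    let n11 : Int := (n1 : Int) - 1
    let nums2 := nums ++ s
    let nn1 : Int := (PySem.List.count s 1 : Int)
    let st := (PySem.List.pyRange 1 ll 1).foldl (pvBodyA nums2 n11) (s, nn1)
    (n1 : Int) - st.2

-- ===== PORT B =====
-- B's loop body: cnt += [ext[i+k-1] == 1] - [ext[i-1] == 1]; best = max(best, cnt)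
def pvBodyB (ext : List Int) (k : Nat) (st : Int × Int) (i : Int) : Int × Int :=
  let cnt := st.1 + ((if PySem.List.pyGetD ext (i + (k : Int) - 1) 0 = 1 then (1 : Int) else 0)
                    - (if PySem.List.pyGetD ext (i - 1) 0 = 1 then (1 : Int) else 0))
  (cnt, if cnt > st.2 then cnt else st.2)

-- transliteration of Source B: incremental count over the doubled list, running maximum
def minSwaps3_alt (nums : List Int) : Int :=
  let n : Int := nums.length
  let k : Nat := PySem.List.count nums 1
  if k = 0 then 0
  else
    let ext := nums ++ PySem.List.slice nums none (some (k : Int))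
    let cnt0 : Int := (PySem.List.count (PySem.List.slice ext none (some (k : Int))) 1 : Int)
    let st := (PySem.List.pyRange 1 n 1).foldl (pvBodyB ext k) (cnt0, cnt0)
    (k : Int) - st.2

-- ===== PRECONDITION & SPEC =====
def Spec_minSwaps3 (nums : List Int) (out : Int) : Prop := out = minSwaps3_alt nums
instance (nums : List Int) (out : Int) : Decidable (Spec_minSwaps3 nums out) := by unfold Spec_minSwaps3; infer_instance

-- ===== CLAIM (what is proved, stated in full; the proofs are below) =====
def Claim_equal_minSwaps3 : Prop := ∀ (nums : List Int), Dom_minSwaps3 nums → Spec_minSwaps3 nums (minSwaps3 nums)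

-- ===== LEMMAS AND PROOFS =====

-- window j: the k-wide window of ext starting at j
def pvWnd (ext : List Int) (k j : Nat) : List Int := (ext.drop j).take k

-- count of 1s in window j, as an Int
def pvCnt (ext : List Int) (k j : Nat) : Int := ((pvWnd ext k j).count 1 : Int)

-- running maximum of pvCnt over windows 0..m
def pvBest (ext : List Int) (k : Nat) : Nat → Int
  | 0 => pvCnt ext k 0
  | m + 1 => max (pvBest ext k m) (pvCnt ext k (m + 1))

lemma pvWnd_cons (xs : List Int) (k j : Nat) (hk : 1 ≤ k) (h : j + k ≤ xs.length) :
    pvWnd xs k j = xs[j]'(by omega) :: (pvWnd xs k j).tail := by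
  obtain ⟨k', rfl⟩ : ∃ k', k = k' + 1 := ⟨k - 1, by omega⟩
  unfold pvWnd
  rw [List.drop_eq_getElem_cons (show j < xs.length by omega), List.take_succ_cons,
    List.tail_cons]

lemma pvWnd_shift (xs : List Int) (k j : Nat) (hk : 1 ≤ k) (h : j + k < xs.length) :
    (pvWnd xs k j).tail ++ [xs[j + k]] = pvWnd xs k (j + 1) := by
  obtain ⟨k', rfl⟩ : ∃ k', k = k' + 1 := ⟨k - 1, by omega⟩
  unfold pvWnd
  rw [List.drop_eq_getElem_cons (show j < xs.length by omega)]
  rw [List.take_succ_cons, List.tail_cons, List.take_add_one]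
  congr 1
  rw [List.getElem?_drop, List.getElem?_eq_getElem (by omega)]
  simp only [Option.toList_some]
  congr 2
  omega

lemma pvCnt_step (xs : List Int) (k j : Nat) (hk : 1 ≤ k) (h : j + k < xs.length) :
    pvCnt xs k (j + 1) =
      pvCnt xs k j + ((if xs[j + k] = 1 then (1 : Int) else 0)
        - (if xs[j]'(by omega) = 1 then (1 : Int) else 0)) := by
  unfold pvCnt
  rw [← pvWnd_shift xs k j hk h]
  rw [pvWnd_cons xs k j hk (by omega)]
  simp only [List.count_append, List.count_cons, List.count_nil]
  push_cast
  split_ifs <;> simp_all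

lemma pvLoopA (ext : List Int) (k L : Nat) (hk : 1 ≤ k) (hext : ext.length = L + k) :
    ∀ m, m < L →
      (List.range m).foldl (fun (st : List Int × Int) (t : Nat) => pvBodyA ext ((k : Int) - 1) st (1 + (t : Int)))
        (pvWnd ext k 0, pvCnt ext k 0)
      = (pvWnd ext k m, pvBest ext k m) := by
  intro m
  induction m with
  | zero => intro _; simp [pvBest]
  | succ m ih =>
    intro hm
    rw [List.range_succ, List.foldl_append, ih (by omega)]
    simp only [List.foldl_cons, List.foldl_nil]
    have hlt : m + k < ext.length := by omega
    simp only [pvBodyA]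
    rw [pvWnd_cons ext k m hk (by omega)]
    simp only [PySem.List.pop?_zero_cons, Option.map_some, Option.getD_some]
    rw [show (1 : Int) + (m : Int) + ((k : Int) - 1) = ((m + k : Nat) : Int) by omega]
    rw [PySem.List.pyGetD_natCast, List.getD_eq_getElem ext 0 hlt]
    rw [pvWnd_shift ext k m hk hlt]
    simp only [pvBest, pvCnt, PySem.List.count_eq]

lemma pvLoopB (ext : List Int) (k L : Nat) (hk : 1 ≤ k) (hext : ext.length = L + k) :
    ∀ m, m < L →
      (List.range m).foldl (fun (st : Int × Int) (t : Nat) => pvBodyB ext k st (1 + (t : Int)))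
        (pvCnt ext k 0, pvCnt ext k 0)
      = (pvCnt ext k m, pvBest ext k m) := by
  intro m
  induction m with
  | zero => intro _; simp [pvBest]
  | succ m ih =>
    intro hm
    rw [List.range_succ, List.foldl_append, ih (by omega)]
    simp only [List.foldl_cons, List.foldl_nil]
    have hlt : m + k < ext.length := by omega
    simp only [pvBodyB]
    rw [show (1 : Int) + (m : Int) + (k : Int) - 1 = ((m + k : Nat) : Int) by omega]
    rw [show (1 : Int) + (m : Int) - 1 = ((m : Nat) : Int) by omega]
    rw [PySem.List.pyGetD_natCast, PySem.List.pyGetD_natCast,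
        List.getD_eq_getElem ext 0 hlt, List.getD_eq_getElem ext 0 (show m < ext.length by omega)]
    rw [← pvCnt_step ext k m hk hlt]
    have hmax : (if pvCnt ext k (m + 1) > pvBest ext k m then pvCnt ext k (m + 1) else pvBest ext k m)
        = max (pvBest ext k m) (pvCnt ext k (m + 1)) := by
      rw [max_def]; split_ifs <;> omega
    rw [hmax]
    simp [pvBest]

lemma pv_main (nums : List Int) : minSwaps3 nums = minSwaps3_alt nums := by
  by_cases hk0 : PySem.List.count nums 1 = 0
  · have h0 : List.count 1 nums = 0 := by rw [← PySem.List.count_eq]; exact hk0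
    simp [minSwaps3, minSwaps3_alt, h0]
  · have hk : 1 ≤ PySem.List.count nums 1 := Nat.one_le_iff_ne_zero.mpr hk0
    have hkL : PySem.List.count nums 1 ≤ nums.length := by
      rw [PySem.List.count_eq]; exact List.count_le_length
    simp only [minSwaps3, minSwaps3_alt, if_neg hk0, PySem.List.slice_zero_start,
      PySem.List.slice_to_natCast]
    set k := PySem.List.count nums 1 with hkdef
    set ext := nums ++ nums.take k with hextdef
    have hext : ext.length = nums.length + k := by
      simp [hextdef, List.length_take, Nat.min_eq_left hkL]
    have hA0 : nums.take k = pvWnd ext k 0 := by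
      simp [pvWnd, hextdef, List.take_append_of_le_length hkL]
    have hc0 : (PySem.List.count (nums.take k) 1 : Int) = pvCnt ext k 0 := by
      rw [hA0, pvCnt, PySem.List.count_eq]
    have hB0 : (PySem.List.count (ext.take k) 1 : Int) = pvCnt ext k 0 := by
      simp [pvCnt, pvWnd, PySem.List.count_eq]
    rw [PySem.List.pyRange_one]
    have htn : ((nums.length : Int) - 1).toNat = nums.length - 1 := by omega
    rw [htn, List.foldl_map, List.foldl_map]
    rw [hc0, hA0, hB0]
    rw [pvLoopA ext k nums.length hk hext (nums.length - 1) (by omega),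
        pvLoopB ext k nums.length hk hext (nums.length - 1) (by omega)]

-- ===== VERDICT (by name: the statement is the Claim_ definition above) =====
theorem minSwaps3_spec : Claim_equal_minSwaps3 := by
  intro nums _
  exact pv_main nums
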